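-- pv_equiv track=rewrite | github.com/okpyo12/Algorithm | Programmers Algorithm/월간코드챌린지2/약수의개수와덧셈/약수의개수와덧셈.py | solution
-- ===== SOURCE A (Python) =====
-- def solution(left, right):
--     answer = 0
--     for i in range(left,right+1):
--         cnt = 0
--         for j in range(1, i):
--             if i % j == 0:
--                 cnt += 1
--         if cnt % 2 == 1:
--             answer += i
--         else:
--             answer -= i
--     return answer
-- ===== SOURCE B (Python) =====
-- def solution(left, right):
--     # i contributes +i when its proper-divisor count is odd, i.e. when its total
--     # divisor count is even, i.e. when i is NOT a perfect square; -i when it is.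
--     # Track the next perfect square with a moving root k instead of counting
--     # divisors per element.
--     answer = 0
--     k = 1
--     while k * k < left:
--         k += 1
--     for i in range(left, right + 1):
--         if i == k * k:
--             answer -= i
--             k += 1
--         else:
--             answer += i
--     return answer
-- ===== Notes on version B (the rewrite author's own statement) =====
-- stated objective: alternative
-- what changed: A counts each i's proper divisors with an inner loop and uses the count's parity; B drops the inner loop entirely and tracks the next perfect square with a moving root pointer k (an element is subtracted exactly when it equals k*k), using the fact that the divisor count of i is even iff i is not a perfect square.
-- outside the precondition, e.g. on solution(-3, 2): A returns 7, B returns -5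
import Mathlib
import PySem

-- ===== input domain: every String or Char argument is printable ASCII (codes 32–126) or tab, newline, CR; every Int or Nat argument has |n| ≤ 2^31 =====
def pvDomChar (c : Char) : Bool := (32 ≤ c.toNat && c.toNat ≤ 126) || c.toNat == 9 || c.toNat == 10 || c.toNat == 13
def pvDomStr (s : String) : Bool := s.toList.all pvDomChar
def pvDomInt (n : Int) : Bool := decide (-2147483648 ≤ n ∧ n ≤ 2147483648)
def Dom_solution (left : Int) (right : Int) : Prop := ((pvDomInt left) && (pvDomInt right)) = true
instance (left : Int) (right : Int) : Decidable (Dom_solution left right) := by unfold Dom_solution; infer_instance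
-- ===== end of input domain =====

-- B replaces A's per-element divisor-counting inner loop by a moving next-square
-- pointer (an element is subtracted exactly when it is a perfect square); objective: alternative.


-- ===== PORT A =====
def solution (left : Int) (right : Int) : Int :=
  (PySem.List.pyRange left (right + 1) 1).foldl
    (fun answer i =>
      let cnt : Int :=
        (PySem.List.pyRange 1 i 1).foldl
          (fun cnt j => if PySem.Int.mod i j == 0 then cnt + 1 else cnt) 0
      if PySem.Int.mod cnt 2 == 1 then answer + i else answer - i)
    0

-- ===== PORT B =====
-- 'while k * k < left: k += 1'
def solutionAltFindK (left : Int) (k : Int) : Int :=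
  if k * k < left then solutionAltFindK left (k + 1) else k
termination_by (left - k).toNat
decreasing_by
  have hk : k < left := by
    rcases le_or_gt k 0 with h | h
    · nlinarith
    · nlinarith
  omega

def solution_alt (left : Int) (right : Int) : Int :=
  ((PySem.List.pyRange left (right + 1) 1).foldl
    (fun s i => if i == s.2 * s.2 then (s.1 - i, s.2 + 1) else (s.1 + i, s.2))
    (0, solutionAltFindK left 1)).1

-- ===== PRECONDITION & SPEC =====
-- Pre_ restricts to the problem's natural domain (ranges of positive integers, plus empty
-- ranges): for i ≤ 0 A's 'subtract i' is an artefact of its empty inner loop (a nonpositive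
-- number has no counted divisors and is no perfect square), and B does not reproduce it.
def Pre_solution (left : Int) (right : Int) : Prop := 1 ≤ left ∨ right < left
instance (left : Int) (right : Int) : Decidable (Pre_solution left right) := by
  unfold Pre_solution; infer_instance

def pvWitness_solution : Int × Int := (1, 12)

def Spec_solution (left : Int) (right : Int) (out : Int) : Prop := out = solution_alt left right
instance (left : Int) (right : Int) (out : Int) : Decidable (Spec_solution left right out) := by unfold Spec_solution; infer_instance

-- ===== CLAIM (what is proved, stated in full; the proofs are below) =====
def Claim_equal_solution : Prop := ∀ (left : Int) (right : Int), Dom_solution left right → Pre_solution left right → Spec_solution left right (solution left right)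

-- ===== LEMMAS AND PROOFS =====

-- number of proper divisors of n (divisors d with 1 ≤ d < n)
def properDivCount (n : ℕ) : ℕ := ((Finset.Ico 1 n).filter (· ∣ n)).card

lemma countP_range_filter (N : ℕ) (p : ℕ → Bool) :
    (List.range N).countP p = ((Finset.range N).filter (fun m => p m)).card := by
  induction N with
  | zero => rfl
  | succ n ih =>
      rw [List.range_succ, List.countP_append, Finset.range_add_one, Finset.filter_insert]
      by_cases h : p n
      · rw [if_pos h, Finset.card_insert_of_notMem (by simp)]
        simp [ih, h]
      · rw [if_neg h]
        simp [ih, h]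

-- A's inner loop computes the proper-divisor count of i (for 1 ≤ i)
lemma innerCount_eq (i : Int) (hi : 1 ≤ i) :
    (PySem.List.pyRange 1 i 1).foldl
      (fun cnt j => if PySem.Int.mod i j == 0 then cnt + 1 else cnt) (0 : Int)
    = (properDivCount i.toNat : Int) := by
  rw [PySem.List.foldl_if_add_one, zero_add, PySem.List.pyRange_one, List.countP_map]
  congr 1
  have hcp : ∀ m : ℕ, ((PySem.Int.mod i (1 + (m : Int)) == 0)) = decide ((m + 1) ∣ i.toNat) := by
    intro m
    have h1 : PySem.Int.mod i (1 + (m : Int)) = 0 ↔ ((1 + (m : Int)) ∣ i) :=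
      PySem.Int.mod_eq_zero_iff_dvd _ _
    have h2 : ((1 + (m : Int)) ∣ i) ↔ ((m + 1) ∣ i.toNat) := by
      rw [show (1 + (m : Int)) = ((m + 1 : ℕ) : Int) by push_cast; ring,
        show i = (i.toNat : Int) by omega]
      exact Int.natCast_dvd_natCast
    rw [Bool.eq_iff_iff]
    simp [h1, h2]
  simp only [Function.comp_def, hcp]
  rw [countP_range_filter]
  unfold properDivCount
  apply Finset.card_bij (fun m _ => m + 1)
  · intro m hm
    simp only [Finset.mem_filter, Finset.mem_range] at hm
    simp only [Finset.mem_filter, Finset.mem_Ico]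
    refine ⟨⟨by omega, by omega⟩, by simpa using hm.2⟩
  · intro m1 h1 m2 h2 h
    omega
  · intro d hd
    simp only [Finset.mem_filter, Finset.mem_Ico] at hd
    refine ⟨d - 1, ?_, by omega⟩
    simp only [Finset.mem_filter, Finset.mem_range]
    constructor
    · omega
    · simp only [decide_eq_true_eq, Nat.sub_add_cancel hd.1.1]
      exact hd.2

-- total divisor count = proper divisor count + 1
lemma card_divisors_eq (n : ℕ) (hn : 1 ≤ n) :
    n.divisors.card = properDivCount n + 1 := by
  unfold properDivCount
  rw [Nat.divisors, Nat.Ico_succ_right_eq_insert_Ico hn,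
    Finset.filter_insert, if_pos dvd_rfl,
    Finset.card_insert_of_notMem (by simp)]

-- parity of the divisor count detects perfect squares (pair d with n / d;
-- the involution has a fixed point exactly when n is a square)
lemma odd_card_divisors_iff (n : ℕ) (hn : 1 ≤ n) :
    Odd n.divisors.card ↔ Nat.sqrt n * Nat.sqrt n = n := by
  classical
  set s := n.divisors with hs
  have hsplit : s.card = (s.filter (fun d => d * d < n)).card
      + (s.filter (fun d => ¬ d * d < n)).card :=
    (Finset.card_filter_add_card_filter_not (fun d => d * d < n)).symm
  have hsplit2 : (s.filter (fun d => ¬ d * d < n)).card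
      = (s.filter (fun d => d * d = n)).card + (s.filter (fun d => n < d * d)).card := by
    rw [← Finset.card_union_of_disjoint]
    · congr 1
      rw [← Finset.filter_or]
      apply Finset.filter_congr
      intro d _
      constructor
      · intro h; omega
      · intro h; omega
    · rw [Finset.disjoint_filter]
      intro d _ h1 h2
      omega
  have hAC : (s.filter (fun d => d * d < n)).card = (s.filter (fun d => n < d * d)).card := by
    apply Finset.card_bij (fun d _ => n / d)
    · intro d hd
      simp only [Finset.mem_filter, Nat.mem_divisors, hs] at hd ⊢
      obtain ⟨⟨⟨c, hc⟩, hn0⟩, hlt⟩ := hd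
      have hd1 : 1 ≤ d := by
        rcases Nat.eq_zero_or_pos d with h | h
        · subst h; simp at hc; omega
        · exact h
      have hdiv : n / d = c := by rw [hc]; exact Nat.mul_div_cancel_left c hd1
      have hdc : d < c := by nlinarith
      refine ⟨⟨?_, hn0⟩, ?_⟩
      · rw [hdiv]; exact ⟨d, by rw [hc, mul_comm]⟩
      · rw [hdiv]; nlinarith
    · intro d1 h1 d2 h2 heq
      simp only [Finset.mem_filter, Nat.mem_divisors, hs] at h1 h2
      have e1 : n / (n / d1) = d1 := Nat.div_div_self h1.1.1 h1.1.2
      have e2 : n / (n / d2) = d2 := Nat.div_div_self h2.1.1 h2.1.2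
      rw [← e1, ← e2, heq]
    · intro e he
      simp only [Finset.mem_filter, Nat.mem_divisors, hs] at he
      obtain ⟨⟨⟨c, hc⟩, hn0⟩, hgt⟩ := he
      have he1 : 1 ≤ e := by
        rcases Nat.eq_zero_or_pos e with h | h
        · subst h; simp at hc; omega
        · exact h
      have hc1 : 1 ≤ c := by
        rcases Nat.eq_zero_or_pos c with h | h
        · subst h; simp at hc; omega
        · exact h
      have hce : c < e := by nlinarith
      refine ⟨c, ?_, ?_⟩
      · simp only [Finset.mem_filter, Nat.mem_divisors, hs]
        exact ⟨⟨⟨e, by rw [hc, mul_comm]⟩, hn0⟩, by nlinarith⟩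
      · rw [hc]; exact Nat.mul_div_left e hc1
  have hB : (s.filter (fun d => d * d = n)).card
      = if Nat.sqrt n * Nat.sqrt n = n then 1 else 0 := by
    by_cases hsq : Nat.sqrt n * Nat.sqrt n = n
    · rw [if_pos hsq]
      rw [show s.filter (fun d => d * d = n) = {Nat.sqrt n} from ?_]
      · exact Finset.card_singleton _
      · ext d
        simp only [Finset.mem_filter, Nat.mem_divisors, Finset.mem_singleton, hs]
        constructor
        · rintro ⟨_, hd⟩
          rw [← hd, Nat.sqrt_eq]
        · rintro rfl
          exact ⟨⟨⟨Nat.sqrt n, hsq.symm⟩, by omega⟩, hsq⟩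
    · rw [if_neg hsq]
      rw [Finset.card_eq_zero]
      ext d
      simp only [Finset.mem_filter, Nat.mem_divisors, Finset.notMem_empty, iff_false, not_and, hs]
      intro _ hd
      exact hsq (by rw [← hd, Nat.sqrt_eq])
  rw [hsplit, hsplit2, hAC, hB]
  by_cases hsq : Nat.sqrt n * Nat.sqrt n = n
  · rw [if_pos hsq, Nat.odd_iff]
    simp only [hsq, iff_true]
    omega
  · rw [if_neg hsq, Nat.odd_iff]
    simp only [hsq, iff_false]
    omega

-- under the root invariant, 'i = k*k' is exactly 'i is a perfect square'
lemma eq_sq_iff (l k : Int) (hk : 1 ≤ k) (hlo : (k - 1) * (k - 1) < l) (hhi : l ≤ k * k) :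
    l = k * k ↔ Nat.sqrt l.toNat * Nat.sqrt l.toNat = l.toNat := by
  have hl1 : 1 ≤ l := by nlinarith
  constructor
  · intro h
    have hkk : l.toNat = k.toNat * k.toNat := by
      have hc : (k.toNat : Int) = k := by omega
      have : ((k.toNat * k.toNat : ℕ) : Int) = k * k := by push_cast [hc]; ring
      omega
    rw [hkk, Nat.sqrt_eq]
  · intro h
    set m := Nat.sqrt l.toNat with hm
    have hcast : ((m * m : ℕ) : Int) = l := by omega
    have hml : (m : Int) * (m : Int) = l := by push_cast at hcast; linarith
    have hmk : (m : Int) = k := by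
      have h0 : (0 : Int) ≤ (m : Int) := by positivity
      have h1 : (m : Int) ≤ k := by nlinarith
      have h2 : k - 1 < (m : Int) := by nlinarith
      omega
    rw [← hml, hmk]

-- A's step equals B's step at any i satisfying the root invariant
lemma step_eq (i k a : Int) (hk : 1 ≤ k) (hlo : (k - 1) * (k - 1) < i) (hhi : i ≤ k * k) :
    (if PySem.Int.mod
        ((PySem.List.pyRange 1 i 1).foldl
          (fun cnt j => if PySem.Int.mod i j == 0 then cnt + 1 else cnt) (0 : Int)) 2 == 1
      then a + i else a - i)
    = (if i == k * k then a - i else a + i) := by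
  have hi1 : 1 ≤ i := by nlinarith
  have hn1 : 1 ≤ i.toNat := by omega
  rw [innerCount_eq i hi1]
  set c := properDivCount i.toNat with hc
  have hkey : (c % 2 = 1) ↔ ¬ (i = k * k) := by
    rw [eq_sq_iff i k hk hlo hhi]
    rw [← odd_card_divisors_iff i.toNat hn1]
    rw [card_divisors_eq i.toNat hn1, ← hc, Nat.odd_iff]
    omega
  by_cases h : c % 2 = 1
  · rw [if_pos (by simp; omega), if_neg (by simpa using hkey.mp h)]
  · have h2 := not_not.mp ((not_iff_not.mpr hkey).mp h)
    rw [if_neg (by simp; omega), if_pos (by simpa using h2)]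

-- the two folds agree given the root invariant at the left end
lemma fold_eq (N : ℕ) : ∀ (l r a k : Int), (r + 1 - l).toNat = N →
    1 ≤ k → (k - 1) * (k - 1) < l → l ≤ k * k →
    ((PySem.List.pyRange l (r + 1) 1).foldl
      (fun s i => if i == s.2 * s.2 then (s.1 - i, s.2 + 1) else (s.1 + i, s.2)) (a, k)).1
    = (PySem.List.pyRange l (r + 1) 1).foldl
      (fun answer i =>
        let cnt : Int :=
          (PySem.List.pyRange 1 i 1).foldl
            (fun cnt j => if PySem.Int.mod i j == 0 then cnt + 1 else cnt) 0
        if PySem.Int.mod cnt 2 == 1 then answer + i else answer - i) a := by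
  induction N with
  | zero =>
    intro l r a k hN _ _ _
    rw [PySem.List.pyRange_one_eq_nil (by omega)]
    rfl
  | succ n ih =>
    intro l r a k hN hk hlo hhi
    rw [PySem.List.pyRange_one_cons (by omega)]
    simp only [List.foldl_cons]
    rw [step_eq l k a hk hlo hhi]
    by_cases hsq : l = k * k
    · rw [if_pos (by simpa using hsq), if_pos (by simpa using hsq)]
      exact ih (l + 1) r (a - l) (k + 1) (by omega) (by omega)
        (by nlinarith) (by nlinarith)
    · rw [if_neg (by simpa using hsq), if_neg (by simpa using hsq)]
      exact ih (l + 1) r (a + l) k (by omega) hk (by nlinarith) (by omega)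

-- the while loop establishes the root invariant
lemma findK_spec : ∀ (left k : Int), 1 ≤ k → (k - 1) * (k - 1) < left →
    1 ≤ solutionAltFindK left k ∧
    (solutionAltFindK left k - 1) * (solutionAltFindK left k - 1) < left ∧
    left ≤ solutionAltFindK left k * solutionAltFindK left k := by
  intro left k
  induction k using solutionAltFindK.induct (left := left) with
  | case1 k hguard ih =>
    intro hk _
    rw [solutionAltFindK]
    simp only [if_pos hguard]
    exact ih (by omega) (by simpa using hguard)
  | case2 k hguard =>
    intro hk hlo
    rw [solutionAltFindK]
    simp only [if_neg hguard]
    exact ⟨hk, hlo, by omega⟩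

-- ===== VERDICT (by name: the statement is the Claim_ definition above) =====
theorem solution_spec : Claim_equal_solution := by
  intro left right _ hpre
  unfold Spec_solution solution solution_alt
  rcases hpre with hl | hr
  · obtain ⟨h1, h2, h3⟩ := findK_spec left 1 (by omega) (by simpa using hl)
    exact (fold_eq (right + 1 - left).toNat left right 0 _ rfl h1 h2 h3).symm
  · rw [PySem.List.pyRange_one_eq_nil (by omega)]
    simp
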